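-- pv_equiv track=rewrite | github.com/JINGBOXIE/BAC_PRO | core/snapshot_engine.py | get_fp_components
-- ===== SOURCE A (Python) =====
-- def get_fp_components(results: list):
--     """
--     [规格文档 3.1 对齐]
--     从原始结果序列 [B, P, B...] 中提取指纹要素：Side, Len, hist_B, hist_P
--     """
--     if not results:
--         return "B", 0, {}, {}
--
--     # 1. 计算当前列方向和长度
--     cur_side = results[-1]
--     cur_len = 0
--     for r in reversed(results):
--         if r == cur_side:
--             cur_len += 1
--         else:
--             break
--
--     # 2. 统计历史分布 (不包含当前正在进行的这一列)
--     hist_B = {}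
--     hist_P = {}
--
--     if len(results) > cur_len:
--         temp_results = results[:-cur_len]
--         if temp_results:
--             # 简单的连路统计逻辑
--             from itertools import groupby
--             streaks = [(label, sum(1 for _ in group)) for label, group in groupby(temp_results)]
--             for side, length in streaks:
--                 target = hist_B if side == "B" else hist_P
--                 l_str = str(length)
--                 target[l_str] = target.get(l_str, 0) + 1
--
--     return cur_side, cur_len, hist_B, hist_P
-- ===== SOURCE B (Python) =====
-- def get_fp_components(results: list):
--     """Single online pass with an open-streak accumulator: no streak list, no
--     slice, no reverse scan.  A streak is flushed into its histogram the moment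
--     the side changes; whatever is still open at the end is the current column."""
--     if not results:
--         return "B", 0, {}, {}
--     hist_B, hist_P = {}, {}
--     side, length = results[0], 1
--     for r in results[1:]:
--         if r == side:
--             length += 1
--         else:
--             target = hist_B if side == "B" else hist_P
--             key = str(length)
--             target[key] = target.get(key, 0) + 1
--             side, length = r, 1
--     return side, length, hist_B, hist_P
-- ===== Notes on version B (the rewrite author's own statement) =====
-- stated objective: simpler
-- what changed: Replaces A's staged pipeline (reverse scan for the current streak, prefix slice, groupby into a streak list, then a tally loop) with one forward pass that keeps only the currently open streak and flushes it straight into its histogram whenever the side changes; the streak still open at the end is the current column, so no streak list, slice or reverse traversal exists.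
import Mathlib
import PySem

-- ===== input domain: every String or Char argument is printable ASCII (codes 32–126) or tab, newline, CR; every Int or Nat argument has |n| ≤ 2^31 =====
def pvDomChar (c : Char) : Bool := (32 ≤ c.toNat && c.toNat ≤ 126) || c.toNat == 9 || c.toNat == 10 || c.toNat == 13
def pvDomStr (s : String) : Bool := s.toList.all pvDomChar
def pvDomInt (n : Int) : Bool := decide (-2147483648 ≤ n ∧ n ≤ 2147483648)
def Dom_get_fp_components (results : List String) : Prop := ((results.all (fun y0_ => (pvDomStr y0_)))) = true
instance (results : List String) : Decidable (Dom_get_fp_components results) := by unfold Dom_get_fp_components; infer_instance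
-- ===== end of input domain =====

-- B replaces A's staged pipeline (reverse scan, prefix slice, groupby streak list,
-- tally loop) by one forward pass that flushes each finished streak into its
-- histogram as it closes (simpler decomposition, same return value; no speed claim).

-- ===== PORT A =====
-- the 'for r in reversed(results): if r == cur_side: cur_len += 1 else: break' loop
def aCount (side : String) : List String → Int
  | [] => 0
  | r :: rest => if r == side then 1 + aCount side rest else 0

-- itertools.groupby(temp_results) with the per-group counts: the streak list
def aRuns : List String → List (String × Int)
  | [] => []
  | r :: rest =>
    match aRuns rest with
    | [] => [(r, 1)]
    | (s, n) :: t => if r == s then (s, n + 1) :: t else (r, 1) :: (s, n) :: t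

-- 'target = hist_B if side == "B" else hist_P; target[l_str] = target.get(l_str, 0) + 1'
def aHistStep (st : PySem.Dict String Int × PySem.Dict String Int) (p : String × Int) :
    PySem.Dict String Int × PySem.Dict String Int :=
  if p.1 == "B" then
    (st.1.insert (PySem.Int.toStr p.2) (st.1.getD (PySem.Int.toStr p.2) 0 + 1), st.2)
  else
    (st.1, st.2.insert (PySem.Int.toStr p.2) (st.2.getD (PySem.Int.toStr p.2) 0 + 1))

def get_fp_components (results : List String) : String × Int × (List (String × Int)) × (List (String × Int)) :=
  if results = [] then ("B", 0, [], [])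
  else
    match PySem.List.pyGet? results (-1) with   -- results[-1]; some _ since results ≠ []
    | none => ("B", 0, [], [])
    | some cur_side =>
      let cur_len := aCount cur_side results.reverse
      let hists :=
        if (results.length : Int) > cur_len then
          let temp := PySem.List.slice results none (some (-cur_len))   -- results[:-cur_len]
          if temp ≠ [] then
            (aRuns temp).foldl aHistStep (PySem.Dict.empty, PySem.Dict.empty)
          else (PySem.Dict.empty, PySem.Dict.empty)
        else (PySem.Dict.empty, PySem.Dict.empty)
      (cur_side, cur_len, hists.1.items, hists.2.items)

-- ===== PORT B =====
-- one step of B's single pass: state = (open side, open length, hist_B, hist_P);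
-- a side change flushes the open streak into its histogram and reopens
def bStep (st : String × Int × PySem.Dict String Int × PySem.Dict String Int) (r : String) :
    String × Int × PySem.Dict String Int × PySem.Dict String Int :=
  if r == st.1 then (st.1, st.2.1 + 1, st.2.2)
  else if st.1 == "B" then
    (r, 1, st.2.2.1.insert (PySem.Int.toStr st.2.1) (st.2.2.1.getD (PySem.Int.toStr st.2.1) 0 + 1), st.2.2.2)
  else
    (r, 1, st.2.2.1, st.2.2.2.insert (PySem.Int.toStr st.2.1) (st.2.2.2.getD (PySem.Int.toStr st.2.1) 0 + 1))

def get_fp_components_alt (results : List String) : String × Int × (List (String × Int)) × (List (String × Int)) :=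
  match results with
  | [] => ("B", 0, [], [])
  | first :: rest =>   -- side, length = results[0], 1; for r in results[1:]: …
    let st := rest.foldl bStep (first, 1, PySem.Dict.empty, PySem.Dict.empty)
    (st.1, st.2.1, st.2.2.1.items, st.2.2.2.items)

-- ===== PRECONDITION & SPEC =====
def Spec_get_fp_components (results : List String) (out : String × Int × (List (String × Int)) × (List (String × Int))) : Prop := out = get_fp_components_alt results
instance (results : List String) (out : String × Int × (List (String × Int)) × (List (String × Int))) : Decidable (Spec_get_fp_components results out) := by unfold Spec_get_fp_components; infer_instance

-- ===== CLAIM (what is proved, stated in full; the proofs are below) =====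
def Claim_equal_get_fp_components : Prop := ∀ (results : List String), Dom_get_fp_components results → Spec_get_fp_components results (get_fp_components results)

-- ===== LEMMAS AND PROOFS =====

-- merging a pending run (label r, length n) into an already-grouped list
def mergeRun (r : String) (n : Int) : List (String × Int) → List (String × Int)
  | [] => [(r, n)]
  | (s, m) :: t => if s == r then (r, n + m) :: t else (r, n) :: (s, m) :: t

theorem mergeRun_ne_nil (r : String) (n : Int) (rs : List (String × Int)) :
    mergeRun r n rs ≠ [] := by
  cases rs with
  | nil => simp [mergeRun]
  | cons p t => obtain ⟨s, m⟩ := p; by_cases h : s = r <;> simp [mergeRun, h]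

theorem aRuns_cons_eq (r : String) (rest : List String) :
    aRuns (r :: rest) = mergeRun r 1 (aRuns rest) := by
  cases h : aRuns rest with
  | nil => simp [aRuns, mergeRun, h]
  | cons p t =>
    obtain ⟨s, n⟩ := p
    by_cases hrs : r = s
    · subst hrs; simp [aRuns, mergeRun, h, add_comm]
    · simp [aRuns, mergeRun, h, hrs, Ne.symm hrs]

theorem aRuns_ne_nil (r : String) (rest : List String) : aRuns (r :: rest) ≠ [] := by
  rw [aRuns_cons_eq]; exact mergeRun_ne_nil _ _ _

theorem mergeRun_mergeRun (s : String) (n m : Int) (rs : List (String × Int)) :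
    mergeRun s n (mergeRun s m rs) = mergeRun s (n + m) rs := by
  cases rs with
  | nil => simp [mergeRun]
  | cons p t =>
    obtain ⟨s', k⟩ := p
    by_cases h : s' = s
    · subst h; simp [mergeRun, add_assoc]
    · simp [mergeRun, h]

theorem mergeRun_of_ne (s r : String) (n m : Int) (t : List (String × Int)) (h : s ≠ r) :
    mergeRun s n ((r, m) :: t) = (s, n) :: (r, m) :: t := by
  simp [mergeRun, Ne.symm h]

theorem mergeRun_head (r : String) (n : Int) (rs : List (String × Int)) :
    ∃ m t', mergeRun r n rs = (r, m) :: t' := by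
  cases rs with
  | nil => exact ⟨n, [], rfl⟩
  | cons p t =>
    obtain ⟨s, k⟩ := p
    by_cases h : s = r <;> simp [mergeRun, h]

-- the invariant of B's single pass: from an open streak (s, n) and histograms H,
-- the fold ends with the last run of mergeRun s n (aRuns l) open and all earlier
-- runs flushed, in order, into H
theorem foldl_bStep (l : List String) :
    ∀ (s : String) (n : Int) (H : PySem.Dict String Int × PySem.Dict String Int),
      l.foldl bStep (s, n, H) =
        (((mergeRun s n (aRuns l)).getLastD ("", 0)).1,
         ((mergeRun s n (aRuns l)).getLastD ("", 0)).2,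
         (mergeRun s n (aRuns l)).dropLast.foldl aHistStep H) := by
  induction l with
  | nil => intro s n H; simp [aRuns, mergeRun]
  | cons r l' ih =>
    intro s n H
    rw [List.foldl_cons, aRuns_cons_eq]
    by_cases hrs : r = s
    · subst hrs
      have hb : bStep (r, n, H) r = (r, n + 1, H) := by simp [bStep]
      rw [hb, ih, mergeRun_mergeRun, add_comm]
    · have hb : bStep (s, n, H) r = (r, 1, aHistStep H (s, n)) := by
        simp only [bStep, aHistStep]
        split_ifs with h1 h2 h2 <;> simp_all
      rw [hb, ih]
      obtain ⟨m, t', ht'⟩ := mergeRun_head r 1 (aRuns l')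
      rw [ht', mergeRun_of_ne s r n m t' (Ne.symm hrs)]
      simp

theorem aCount_eq (side : String) (m : List String) :
    aCount side m = ((m.takeWhile (fun r => r == side)).length : Int) := by
  induction m with
  | nil => simp [aCount]
  | cons r rest ih =>
    by_cases h : r = side
    · simp [aCount, h, ih]; ring
    · simp [aCount, h]

theorem mergeRun_append (r : String) (n : Int) (rs ys : List (String × Int)) (h : rs ≠ []) :
    mergeRun r n (rs ++ ys) = mergeRun r n rs ++ ys := by
  cases rs with
  | nil => exact absurd rfl h
  | cons p t =>
    obtain ⟨s, m⟩ := p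
    by_cases hsr : s = r <;> simp [mergeRun, hsr]

theorem aRuns_replicate (s : String) (k : Nat) :
    aRuns (List.replicate (k + 1) s) = [(s, (k : Int) + 1)] := by
  induction k with
  | zero => simp [aRuns]
  | succ j ih =>
    rw [List.replicate_succ, aRuns_cons_eq, ih]
    simp [mergeRun, add_comm]

theorem aRuns_append_rep (s : String) (k : Nat) (hk : 1 ≤ k) :
    ∀ t : List String, t.getLast? ≠ some s →
      aRuns (t ++ List.replicate k s) = aRuns t ++ [(s, (k : Int))] := by
  intro t
  induction t with
  | nil =>
    intro _
    obtain ⟨j, rfl⟩ : ∃ j, k = j + 1 := ⟨k - 1, by omega⟩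
    rw [List.nil_append, aRuns_replicate]
    simp [aRuns]
  | cons r t' ih =>
    intro hlast
    cases t' with
    | nil =>
      have hr : r ≠ s := by simpa using hlast
      obtain ⟨j, rfl⟩ : ∃ j, k = j + 1 := ⟨k - 1, by omega⟩
      rw [List.cons_append, List.nil_append, aRuns_cons_eq, aRuns_replicate,
          mergeRun_of_ne r s 1 _ _ hr]
      simp [aRuns]
    | cons r2 t2 =>
      have hlast' : (r2 :: t2).getLast? ≠ some s := by
        rwa [List.getLast?_cons_cons] at hlast
      have h1 := ih hlast'
      rw [List.cons_append, aRuns_cons_eq, h1,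
          mergeRun_append r 1 _ _ (aRuns_ne_nil r2 t2), ← aRuns_cons_eq]

-- main pointwise equality of the two ports
theorem ports_eq (results : List String) :
    get_fp_components results = get_fp_components_alt results := by
  cases hres : results with
  | nil => rfl
  | cons r0 rest0 =>
    rw [← hres]
    have hnil : results ≠ [] := by rw [hres]; exact List.cons_ne_nil _ _
    obtain ⟨s, hs⟩ := Option.isSome_iff_exists.mp (List.getLast?_isSome.mpr hnil)
    have hhead : results.reverse.head? = some s := by rw [List.head?_reverse]; exact hs
    obtain ⟨k, hk⟩ : ∃ k, (results.reverse.takeWhile (fun r => r == s)).length = k := ⟨_, rfl⟩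
    obtain ⟨tp, htp⟩ : ∃ tp, (results.reverse.dropWhile (fun r => r == s)).reverse = tp := ⟨_, rfl⟩
    have htw : results.reverse.takeWhile (fun r => r == s) = List.replicate k s := by
      rw [← hk]
      exact List.eq_replicate_iff.mpr ⟨rfl, fun b hb => by simpa using List.mem_takeWhile_imp hb⟩
    have hsplit : results = tp ++ List.replicate k s := by
      rw [← htp]
      conv_lhs => rw [← List.reverse_reverse results,
        ← List.takeWhile_append_dropWhile (p := fun r => r == s) (l := results.reverse)]
      rw [List.reverse_append, htw, List.reverse_replicate]
    have hk1 : 1 ≤ k := by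
      rw [← hk]
      cases hm : results.reverse with
      | nil => rw [hm] at hhead; simp at hhead
      | cons a mt =>
        rw [hm] at hhead
        have ha : a = s := by simpa using hhead
        subst ha
        simp
    have hlast_tp : tp.getLast? ≠ some s := by
      rw [← htp, List.getLast?_reverse]
      cases hd : (results.reverse.dropWhile (fun r => r == s)).head? with
      | none => simp
      | some x =>
        have hne : results.reverse.dropWhile (fun r => r == s) ≠ [] := by
          intro h; rw [h] at hd; simp at hd
        have hx : (x == s) = false := by
          have h2 := List.head_dropWhile_not (fun r => r == s) hne
          have h3 : (results.reverse.dropWhile (fun r => r == s)).head hne = x := by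
            have h4 := List.head?_eq_some_head hne
            rw [h4] at hd
            exact Option.some_inj.mp hd
          rwa [h3] at h2
        simp only [ne_eq, Option.some.injEq]
        intro h; subst h; simp at hx
    have hlen : results.length = tp.length + k := by rw [hsplit]; simp
    have hcount : aCount s results.reverse = (k : Int) := by rw [aCount_eq, hk]
    have hget : PySem.List.pyGet? results (-1) = some s := by
      rw [PySem.List.pyGet?_neg_one]; exact hs
    have hruns : aRuns results = aRuns tp ++ [(s, (k : Int))] := by
      conv_lhs => rw [hsplit]
      exact aRuns_append_rep s k hk1 tp hlast_tp
    -- B's fold, expressed through the invariant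
    have hfold : rest0.foldl bStep (r0, 1, PySem.Dict.empty, PySem.Dict.empty)
        = (s, (k : Int), (aRuns tp).foldl aHistStep (PySem.Dict.empty, PySem.Dict.empty)) := by
      rw [foldl_bStep, ← aRuns_cons_eq, ← hres, hruns]
      simp
    have halt : get_fp_components_alt results
        = (s, (k : Int),
           ((aRuns tp).foldl aHistStep (PySem.Dict.empty, PySem.Dict.empty)).1.items,
           ((aRuns tp).foldl aHistStep (PySem.Dict.empty, PySem.Dict.empty)).2.items) := by
      rw [hres]
      simp only [get_fp_components_alt]
      rw [hfold]
    by_cases htpnil : tp = []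
    · have hlen0 : results.length = k := by rw [hlen, htpnil]; simp
      have hng : ¬ (((results.length : Nat) : Int) > (k : Int)) := by rw [hlen0]; omega
      rw [halt]
      simp only [get_fp_components, if_neg hnil, hget, hcount]
      rw [if_neg hng]
      simp [htpnil, aRuns]
    · have htplen : 0 < tp.length := List.length_pos_iff.mpr htpnil
      have hguard : (((results.length : Nat) : Int) > (k : Int)) := by
        rw [hlen]; push_cast; omega
      have hslice : PySem.List.slice results none (some (-(k : Int))) = tp := by
        rw [PySem.List.slice_to_neg_natCast _ _ (by omega)]
        conv_lhs => rw [hsplit]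
        simp
      rw [halt]
      simp only [get_fp_components, if_neg hnil, hget, hcount]
      rw [if_pos hguard]
      simp only [hslice]
      rw [if_pos htpnil]

-- ===== VERDICT (by name: the statement is the Claim_ definition above) =====
theorem get_fp_components_spec : Claim_equal_get_fp_components := by
  intro results _
  unfold Spec_get_fp_components
  exact ports_eq results
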